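-- pv_equiv track=rewrite | github.com/psimps21/Rosalind-Bioinformatics-Stronghold | problems/REAR.py | ComputeEndMatches
-- ===== SOURCE A (Python) =====
-- def ComputeEndMatches(seq1, seq2):
--     b_match, e_match = 0,0
--     i,j = 0,1
--
--     # Find length of beginning match
--     while i < len(seq1) and seq1[i] == seq2[i]:
--         b_match += 1
--         i += 1
--
--     # Find length of ending matvh match
--     while j <= len(seq1) and seq1[-j] == seq2[-j]:
--         e_match += 1
--         j += 1
--
--     return b_match, e_match
-- ===== SOURCE B (Python) =====
-- def ComputeEndMatches(seq1, seq2):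
--     n1, n2 = len(seq1), len(seq2)
--
--     def largest(ok):
--         # binary search for the largest k in [0, n1] satisfying ok;
--         # ok is downward-closed and ok(0) holds
--         lo, hi = 0, n1
--         while lo < hi:
--             mid = (lo + hi + 1) // 2
--             if ok(mid):
--                 lo = mid
--             else:
--                 hi = mid - 1
--         return lo
--
--     b = largest(lambda k: k <= n2 and seq1[:k] == seq2[:k])
--     e = largest(lambda k: k <= n2 and seq1[n1 - k:] == seq2[n2 - k:])
--     return b, e
-- ===== Notes on version B (the rewrite author's own statement) =====
-- stated objective: alternative
-- what changed: Replaces A's element-by-element while loops (the second walking backwards with negative indices) by a binary search for the largest k such that the first/last k elements agree, a downward-closed predicate decided by whole-slice comparisons.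
import Mathlib
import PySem

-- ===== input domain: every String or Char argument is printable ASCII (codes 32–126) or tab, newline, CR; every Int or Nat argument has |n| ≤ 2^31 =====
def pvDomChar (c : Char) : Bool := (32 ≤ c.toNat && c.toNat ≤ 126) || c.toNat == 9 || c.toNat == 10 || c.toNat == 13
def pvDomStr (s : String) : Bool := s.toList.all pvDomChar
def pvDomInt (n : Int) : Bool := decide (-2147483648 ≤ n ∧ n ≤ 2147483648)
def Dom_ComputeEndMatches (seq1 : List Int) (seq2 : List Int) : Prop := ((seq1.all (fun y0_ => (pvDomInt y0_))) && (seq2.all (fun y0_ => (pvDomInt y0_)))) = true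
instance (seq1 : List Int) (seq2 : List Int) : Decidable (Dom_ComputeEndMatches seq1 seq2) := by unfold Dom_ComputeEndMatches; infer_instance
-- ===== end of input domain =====

-- B replaces A's element-by-element while loops by a binary search for the largest k
-- such that the first (resp. last) k elements of the two lists agree — a downward-closed
-- predicate decided by whole-slice comparisons (objective: alternative algorithm).

-- ===== PORT A =====
-- first while loop: i counts up from 0 while i < len(seq1) and seq1[i] == seq2[i];
-- fuel = len(seq1) - i bounds the recursion; an out-of-range seq2[i] (IndexError) only
-- happens outside Pre_, where the port just stops.
def aBeg (seq1 seq2 : List Int) : Nat → Nat → Int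
  | 0, _ => 0
  | fuel + 1, i =>
    if i < seq1.length then
      match PySem.List.pyGet? seq1 (i : Int), PySem.List.pyGet? seq2 (i : Int) with
      | some x, some y => if x = y then 1 + aBeg seq1 seq2 fuel (i + 1) else 0
      | _, _ => 0
    else 0

-- second while loop: j counts up from 1 while j <= len(seq1) and seq1[-j] == seq2[-j]
def aEnd (seq1 seq2 : List Int) : Nat → Nat → Int
  | 0, _ => 0
  | fuel + 1, j =>
    if j ≤ seq1.length then
      match PySem.List.pyGet? seq1 (-(j : Int)), PySem.List.pyGet? seq2 (-(j : Int)) with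
      | some x, some y => if x = y then 1 + aEnd seq1 seq2 fuel (j + 1) else 0
      | _, _ => 0
    else 0

def ComputeEndMatches (seq1 : List Int) (seq2 : List Int) : Int × Int :=
  (aBeg seq1 seq2 seq1.length 0, aEnd seq1 seq2 (seq1.length + 1) 1)

-- ===== PORT B =====
-- Source B's helper `largest(ok)`: binary search on [lo, hi] for the largest k with ok k;
-- the while loop becomes recursion on hi - lo.
def bLargest (ok : Nat → Bool) (lo hi : Nat) : Nat :=
  if _h : lo < hi then
    let mid := (lo + hi + 1) / 2
    if ok mid then bLargest ok mid hi else bLargest ok lo (mid - 1)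
  else lo
  termination_by hi - lo
  decreasing_by all_goals omega

-- the two predicates; Python's nonnegative-bound slices seq1[:k], seq1[n1-k:] are exactly
-- List.take k / List.drop (n1-k) here (0 ≤ n1-k since the search keeps k ≤ n1)
def ComputeEndMatches_alt (seq1 : List Int) (seq2 : List Int) : Int × Int :=
  let n1 := seq1.length
  let n2 := seq2.length
  let b := bLargest (fun k => decide (k ≤ n2) && decide (seq1.take k = seq2.take k)) 0 n1
  let e := bLargest (fun k => decide (k ≤ n2) && decide (seq1.drop (n1 - k) = seq2.drop (n2 - k))) 0 n1
  ((b : Int), (e : Int))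

-- ===== PRECONDITION & SPEC =====
-- Pre_ excludes exactly the inputs where A raises IndexError: len(seq2) < len(seq1) with
-- the common prefix or the common suffix covering all of seq2.
def Pre_ComputeEndMatches (seq1 : List Int) (seq2 : List Int) : Prop :=
  seq1.length ≤ seq2.length ∨
    (seq1.take seq2.length ≠ seq2 ∧ seq1.drop (seq1.length - seq2.length) ≠ seq2)
instance (seq1 : List Int) (seq2 : List Int) : Decidable (Pre_ComputeEndMatches seq1 seq2) := by
  unfold Pre_ComputeEndMatches; infer_instance

def pvWitness_ComputeEndMatches : List Int × List Int := ([1, 2, 3], [1, 5, 3])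

def Spec_ComputeEndMatches (seq1 : List Int) (seq2 : List Int) (out : Int × Int) : Prop :=
  out = ComputeEndMatches_alt seq1 seq2
instance (seq1 : List Int) (seq2 : List Int) (out : Int × Int) : Decidable (Spec_ComputeEndMatches seq1 seq2 out) := by
  unfold Spec_ComputeEndMatches; infer_instance

-- ===== CLAIM (what is proved, stated in full; the proofs are below) =====
def Claim_equal_ComputeEndMatches : Prop := ∀ (seq1 : List Int) (seq2 : List Int), Dom_ComputeEndMatches seq1 seq2 → Pre_ComputeEndMatches seq1 seq2 → Spec_ComputeEndMatches seq1 seq2 (ComputeEndMatches seq1 seq2)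

-- ===== LEMMAS AND PROOFS =====

-- proof-side characterisation of both results: length of the longest common prefix
def lcp : List Int → List Int → Nat
  | x :: xs, y :: ys => if x = y then 1 + lcp xs ys else 0
  | _, _ => 0

lemma lcp_le_left : ∀ a b : List Int, lcp a b ≤ a.length := by
  intro a
  induction a with
  | nil => intro b; cases b <;> simp [lcp]
  | cons x xs ih =>
    intro b
    cases b with
    | nil => simp [lcp]
    | cons y ys =>
      by_cases h : x = y <;> simp [lcp, h]
      have := ih ys; omega

lemma lcp_le_right : ∀ a b : List Int, lcp a b ≤ b.length := by
  intro a
  induction a with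
  | nil => intro b; cases b <;> simp [lcp]
  | cons x xs ih =>
    intro b
    cases b with
    | nil => simp [lcp]
    | cons y ys =>
      by_cases h : x = y <;> simp [lcp, h]
      have := ih ys; omega

lemma take_lcp_eq : ∀ a b : List Int, a.take (lcp a b) = b.take (lcp a b) := by
  intro a
  induction a with
  | nil => intro b; cases b <;> simp [lcp]
  | cons x xs ih =>
    intro b
    cases b with
    | nil => simp [lcp]
    | cons y ys =>
      by_cases h : x = y
      · subst h
        have hl : lcp (x :: xs) (x :: ys) = lcp xs ys + 1 := by
          simp [lcp, Nat.add_comm]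
        rw [hl, List.take_succ_cons, List.take_succ_cons, ih ys]
      · simp [lcp, h]

lemma take_lcp_succ_ne : ∀ a b : List Int, lcp a b < a.length → lcp a b < b.length →
    a.take (lcp a b + 1) ≠ b.take (lcp a b + 1) := by
  intro a
  induction a with
  | nil => intro b h1 _; simp at h1
  | cons x xs ih =>
    intro b h1 h2
    cases b with
    | nil => simp at h2
    | cons y ys =>
      by_cases h : x = y
      · simp only [lcp, if_pos h] at h1 h2 ⊢
        have h1' : lcp xs ys < xs.length := by simp at h1; omega
        have h2' : lcp xs ys < ys.length := by simp at h2; omega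
        have hne := ih ys h1' h2'
        simp only [Nat.add_comm 1, Nat.add_assoc, List.take_succ_cons, h]
        intro heq
        exact hne (by injection heq)
      · simp only [lcp, if_neg h, Nat.zero_add, List.take_succ_cons, List.take_zero]
        intro heq; injection heq with hx _; exact h hx

-- take-equality is downward closed
lemma take_eq_mono {a b : List Int} {k m : Nat} (hkm : k ≤ m)
    (h : a.take m = b.take m) : a.take k = b.take k := by
  have := congrArg (List.take k) h
  simpa [List.take_take, Nat.min_eq_left hkm] using this

-- binary search correctness: from a true lower end it lands on a k that is true
-- and maximal-looking (either hi or followed by a false k+1)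
lemma bLargest_correct (ok : Nat → Bool) :
    ∀ n lo hi, hi - lo ≤ n → lo ≤ hi → ok lo = true →
      lo ≤ bLargest ok lo hi ∧ bLargest ok lo hi ≤ hi ∧ ok (bLargest ok lo hi) = true ∧
        (bLargest ok lo hi = hi ∨ ok (bLargest ok lo hi + 1) = false) := by
  intro n
  induction n with
  | zero =>
    intro lo hi hn hle hok
    have : lo = hi := by omega
    subst this
    rw [bLargest]; simp [hok]
  | succ m ih =>
    intro lo hi hn hle hok
    rw [bLargest]
    by_cases h : lo < hi
    · rw [dif_pos h]
      set mid := (lo + hi + 1) / 2 with hmid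
      have hlom : lo < mid := by omega
      have hmhi : mid ≤ hi := by omega
      by_cases hm : ok mid = true
      · simp only [hm, if_true]
        have := ih mid hi (by omega) hmhi hm
        exact ⟨by omega, this.2.1, this.2.2.1, this.2.2.2⟩
      · simp only [hm, if_false, Bool.false_eq_true]
        have := ih lo (mid - 1) (by omega) (by omega) hok
        refine ⟨this.1, by omega, this.2.2.1, ?_⟩
        rcases this.2.2.2 with heq | hf
        · right; rw [heq]
          have : mid - 1 + 1 = mid := by omega
          rw [this]
          simpa using hm
        · right; exact hf
    · rw [dif_neg h]
      have : lo = hi := by omega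
      exact ⟨le_refl _, by omega, hok, Or.inl this⟩

-- uniqueness of such a k for a downward-closed predicate
lemma largest_unique {ok : Nat → Bool} (mono : ∀ k, ok (k + 1) = true → ok k = true)
    {hi r s : Nat} (hr : r ≤ hi) (hokr : ok r = true) (hmr : r = hi ∨ ok (r + 1) = false)
    (hs : s ≤ hi) (hoks : ok s = true) (hms : s = hi ∨ ok (s + 1) = false) : r = s := by
  have down : ∀ m k : Nat, k ≤ m → ok m = true → ok k = true := by
    intro m
    induction m with
    | zero => intro k hk h; simpa [Nat.le_zero.mp hk] using h
    | succ p ihp =>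
      intro k hk h
      rcases Nat.eq_or_lt_of_le hk with rfl | hlt
      · exact h
      · exact ihp k (by omega) (mono p h)
  by_contra hne
  rcases Nat.lt_or_ge r s with hlt | hge
  · rcases hmr with rfl | hf
    · omega
    · have := down s (r + 1) hlt hoks
      rw [this] at hf; exact absurd hf (by simp)
  · have hlt : s < r := by omega
    rcases hms with rfl | hf
    · omega
    · have := down r (s + 1) hlt hokr
      rw [this] at hf; exact absurd hf (by simp)

-- the prefix binary search computes lcp
lemma bLargest_prefix (s1 s2 : List Int) :
    bLargest (fun k => decide (k ≤ s2.length) && decide (s1.take k = s2.take k)) 0 s1.length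
      = lcp s1 s2 := by
  set ok : Nat → Bool := fun k => decide (k ≤ s2.length) && decide (s1.take k = s2.take k) with hok
  have mono : ∀ k, ok (k + 1) = true → ok k = true := by
    intro k h
    simp only [hok, Bool.and_eq_true, decide_eq_true_eq] at h ⊢
    exact ⟨by omega, take_eq_mono (by omega) h.2⟩
  have hok0 : ok 0 = true := by simp [hok]
  obtain ⟨h1, h2, h3, h4⟩ :=
    bLargest_correct ok s1.length 0 s1.length (by omega) (by omega) hok0
  have hLhi : lcp s1 s2 ≤ s1.length := lcp_le_left s1 s2
  have hokL : ok (lcp s1 s2) = true := by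
    simp only [hok, Bool.and_eq_true, decide_eq_true_eq]
    exact ⟨lcp_le_right s1 s2, take_lcp_eq s1 s2⟩
  have hmL : lcp s1 s2 = s1.length ∨ ok (lcp s1 s2 + 1) = false := by
    by_cases hL : lcp s1 s2 = s1.length
    · exact Or.inl hL
    · right
      simp only [hok, Bool.and_eq_false_iff, decide_eq_false_iff_not]
      by_cases h2n : lcp s1 s2 + 1 ≤ s2.length
      · right
        exact take_lcp_succ_ne s1 s2 (by have := lcp_le_left s1 s2; omega) (by omega)
      · left; omega
  exact largest_unique mono h2 h3 h4 hLhi hokL hmL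

-- suffix slices versus takes of the reversals
lemma drop_eq_iff_take_rev (s1 s2 : List Int) (k : Nat) (hk1 : k ≤ s1.length)
    (hk2 : k ≤ s2.length) :
    (s1.drop (s1.length - k) = s2.drop (s2.length - k)) ↔
      (s1.reverse.take k = s2.reverse.take k) := by
  have e1 : (s1.drop (s1.length - k)).reverse = s1.reverse.take k := by
    rw [List.reverse_drop]; congr 1; omega
  have e2 : (s2.drop (s2.length - k)).reverse = s2.reverse.take k := by
    rw [List.reverse_drop]; congr 1; omega
  constructor
  · intro h; rw [← e1, ← e2, h]
  · intro h
    have := congrArg List.reverse (e1.trans (h.trans e2.symm))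
    simpa using this

-- the suffix binary search computes lcp of the reversals
lemma bLargest_suffix (s1 s2 : List Int) :
    bLargest (fun k => decide (k ≤ s2.length) &&
        decide (s1.drop (s1.length - k) = s2.drop (s2.length - k))) 0 s1.length
      = lcp s1.reverse s2.reverse := by
  set ok : Nat → Bool := fun k => decide (k ≤ s2.length) &&
      decide (s1.drop (s1.length - k) = s2.drop (s2.length - k)) with hok
  set L := lcp s1.reverse s2.reverse with hL
  have hL1 : L ≤ s1.length := by have := lcp_le_left s1.reverse s2.reverse; simpa using this
  have hL2 : L ≤ s2.length := by have := lcp_le_right s1.reverse s2.reverse; simpa using this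
  have mono : ∀ k, ok (k + 1) = true → ok k = true := by
    intro k h
    simp only [hok, Bool.and_eq_true, decide_eq_true_eq] at h ⊢
    obtain ⟨hk2, hdrop⟩ := h
    have hk1 : k + 1 ≤ s1.length ∨ ¬ (k + 1 ≤ s1.length) := em _
    refine ⟨by omega, ?_⟩
    by_cases hk1' : k + 1 ≤ s1.length
    · have := (drop_eq_iff_take_rev s1 s2 (k + 1) hk1' hk2).1 hdrop
      exact (drop_eq_iff_take_rev s1 s2 k (by omega) (by omega)).2
        (take_eq_mono (by omega) this)
    · -- k + 1 > len s1: then s1.length - (k+1) = 0 = s1.length - k when k ≥ len s1;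
      -- handle k = s1.length and k > both separately
      by_cases hk1'' : k ≤ s1.length
      · have hk : k = s1.length := by omega
        have := (drop_eq_iff_take_rev s1 s2 k (by omega) (by omega)).2
        have h0 : s1.length - k = 0 := by omega
        have h0' : s1.length - (k + 1) = 0 := by omega
        rw [h0'] at hdrop
        rw [h0]
        calc s1.drop 0 = s2.drop (s2.length - (k + 1)) := hdrop
          _ = s2.drop (s2.length - k) := by
              have hlen := congrArg List.length hdrop
              simp at hlen
              congr 1
              omega
      · have h0 : s1.length - k = 0 := by omega
        have h0' : s1.length - (k + 1) = 0 := by omega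
        rw [h0'] at hdrop
        rw [h0]
        calc s1.drop 0 = s2.drop (s2.length - (k + 1)) := hdrop
          _ = s2.drop (s2.length - k) := by
              have hlen := congrArg List.length hdrop
              simp at hlen
              congr 1
              omega
  have hok0 : ok 0 = true := by simp [hok]
  obtain ⟨h1, h2, h3, h4⟩ :=
    bLargest_correct ok s1.length 0 s1.length (by omega) (by omega) hok0
  have hokL : ok L = true := by
    simp only [hok, Bool.and_eq_true, decide_eq_true_eq]
    refine ⟨hL2, (drop_eq_iff_take_rev s1 s2 L hL1 hL2).2 ?_⟩
    exact take_lcp_eq s1.reverse s2.reverse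
  have hmL : L = s1.length ∨ ok (L + 1) = false := by
    by_cases hL' : L = s1.length
    · exact Or.inl hL'
    · right
      simp only [hok, Bool.and_eq_false_iff, decide_eq_false_iff_not]
      by_cases h2n : L + 1 ≤ s2.length
      · right
        intro hdrop
        have := (drop_eq_iff_take_rev s1 s2 (L + 1) (by omega) h2n).1 hdrop
        exact take_lcp_succ_ne s1.reverse s2.reverse (by simpa using by omega : L < s1.reverse.length)
          (by simpa using by omega : L < s2.reverse.length) this
      · left; omega
  exact largest_unique mono h2 h3 h4 hL1 hokL hmL

-- If two lists of known lengths differ as lists, some index below len2 separates them.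
lemma exists_mismatch {s1 s2 : List Int} (_ : s2.length ≤ s1.length)
    (hne : s1.take s2.length ≠ s2) :
    ∃ k, k < s2.length ∧ s1[k]? ≠ s2[k]? := by
  by_contra h
  push Not at h
  apply hne
  apply List.ext_getElem?
  intro k
  by_cases hk : k < s2.length
  · rw [List.getElem?_take_of_lt hk]
    exact h k hk
  · rw [List.getElem?_eq_none (by simp; omega), List.getElem?_eq_none (by omega)]

-- A's forward loop equals lcp on the dropped tails
lemma aBeg_eq (seq1 seq2 : List Int) :
    ∀ fuel i, seq1.length - i ≤ fuel →
      (seq1.length ≤ seq2.length ∨ ∃ k, i ≤ k ∧ k < seq2.length ∧ seq1[k]? ≠ seq2[k]?) →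
      aBeg seq1 seq2 fuel i = (lcp (seq1.drop i) (seq2.drop i) : Int) := by
  intro fuel
  induction fuel with
  | zero =>
    intro i hf _
    have h1 : seq1.length ≤ i := by omega
    rw [List.drop_eq_nil_of_le h1]
    simp [aBeg, lcp]
  | succ n ih =>
    intro i hf hyp
    by_cases h1 : i < seq1.length
    · have h2 : i < seq2.length := by
        rcases hyp with h | ⟨k, hik, hk, _⟩
        · omega
        · omega
      have g1 : PySem.List.pyGet? seq1 (i : Int) = some seq1[i] :=
        PySem.List.pyGet?_ofNat seq1 i h1
      have g2 : PySem.List.pyGet? seq2 (i : Int) = some seq2[i] :=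
        PySem.List.pyGet?_ofNat seq2 i h2
      have d1 : seq1.drop i = seq1[i] :: seq1.drop (i + 1) :=
        List.drop_eq_getElem_cons h1
      have d2 : seq2.drop i = seq2[i] :: seq2.drop (i + 1) :=
        List.drop_eq_getElem_cons h2
      rw [aBeg, if_pos h1, g1, g2, d1, d2]
      by_cases hxy : seq1[i] = seq2[i]
      · simp only [hxy, lcp]
        have hrec := ih (i + 1) (by omega) (by
          rcases hyp with h | ⟨k, hik, hk, hnek⟩
          · exact Or.inl h
          · refine Or.inr ⟨k, ?_, hk, hnek⟩
            rcases Nat.eq_or_lt_of_le hik with rfl | hlt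
            · exfalso; apply hnek
              rw [List.getElem?_eq_getElem h1, List.getElem?_eq_getElem h2, hxy]
            · omega)
        rw [hrec]
        push_cast
        ring
      · simp [lcp, hxy]
    · have hge : seq1.length ≤ i := by omega
      rw [aBeg, if_neg h1, List.drop_eq_nil_of_le hge]
      simp [lcp]

-- the backward loop is the forward loop on the reversed lists, index shifted by one
lemma aEnd_eq_aBeg (seq1 seq2 : List Int) :
    ∀ fuel j, 1 ≤ j →
      aEnd seq1 seq2 fuel j = aBeg seq1.reverse seq2.reverse fuel (j - 1) := by
  intro fuel
  induction fuel with
  | zero => intro j _; simp [aEnd, aBeg]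
  | succ n ih =>
    intro j hj
    rw [aEnd, aBeg]
    by_cases h1 : j ≤ seq1.length
    · rw [if_pos h1, if_pos (by simp; omega)]
      have g1 : PySem.List.pyGet? seq1 (-(j : Int)) = seq1[seq1.length - j]? :=
        PySem.List.pyGet?_neg_natCast seq1 j (by omega) h1
      have g1' : PySem.List.pyGet? seq1.reverse ((j - 1 : Nat) : Int) = seq1.reverse[j-1]? :=
        PySem.List.pyGet?_natCast _ _
      have e1 : seq1.reverse[j-1]? = seq1[seq1.length - j]? := by
        rw [List.getElem?_reverse (by omega)]
        congr 1
        omega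
      rw [g1, g1', e1]
      by_cases h2 : j ≤ seq2.length
      · have g2 : PySem.List.pyGet? seq2 (-(j : Int)) = seq2[seq2.length - j]? :=
          PySem.List.pyGet?_neg_natCast seq2 j (by omega) h2
        have g2' : PySem.List.pyGet? seq2.reverse ((j - 1 : Nat) : Int) = seq2.reverse[j-1]? :=
          PySem.List.pyGet?_natCast _ _
        have e2 : seq2.reverse[j-1]? = seq2[seq2.length - j]? := by
          rw [List.getElem?_reverse (by omega)]
          congr 1
          omega
        rw [g2, g2', e2]
        rcases hx : seq1[seq1.length - j]? with _ | x
        · rfl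
        rcases hy : seq2[seq2.length - j]? with _ | y
        · rfl
        dsimp only
        by_cases hxy : x = y
        · rw [if_pos hxy, if_pos hxy]
          have : j - 1 + 1 = (j + 1) - 1 := by omega
          rw [ih (j + 1) (by omega), this]
        · rw [if_neg hxy, if_neg hxy]
      · have g2 : PySem.List.pyGet? seq2 (-(j : Int)) = none := by
          rw [PySem.List.pyGet?_eq_none_iff]
          intro hr
          rcases hr with ⟨hlo, hhi⟩
          simp at hlo hhi
          omega
        have g2' : PySem.List.pyGet? seq2.reverse ((j - 1 : Nat) : Int) = none := by
          rw [PySem.List.pyGet?_natCast, List.getElem?_eq_none]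
          simp
          omega
        rw [g2, g2']
        rcases seq1[seq1.length - j]? with _ | x <;> rfl
    · rw [if_neg h1, if_neg (by simp; omega)]

-- ===== VERDICT (by name: the statement is the Claim_ definition above) =====
theorem ComputeEndMatches_spec : Claim_equal_ComputeEndMatches := by
  intro seq1 seq2 _ hpre
  unfold Spec_ComputeEndMatches ComputeEndMatches ComputeEndMatches_alt
  have hbeg : aBeg seq1 seq2 seq1.length 0 = (lcp seq1 seq2 : Int) := by
    have := aBeg_eq seq1 seq2 seq1.length 0 (by omega) ?_
    · simpa using this
    · rcases hpre with h | ⟨h, _⟩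
      · exact Or.inl h
      · by_cases hle : seq1.length ≤ seq2.length
        · exact Or.inl hle
        · obtain ⟨k, hk, hne⟩ := exists_mismatch (by omega) h
          exact Or.inr ⟨k, by omega, hk, hne⟩
  have hend : aEnd seq1 seq2 (seq1.length + 1) 1 = (lcp seq1.reverse seq2.reverse : Int) := by
    rw [aEnd_eq_aBeg seq1 seq2 (seq1.length + 1) 1 (by omega)]
    have := aBeg_eq seq1.reverse seq2.reverse (seq1.length + 1) 0 (by simp) ?_
    · simpa using this
    · rcases hpre with h | ⟨_, h⟩
      · left; simpa using h
      · by_cases hle : seq1.length ≤ seq2.length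
        · left; simpa using hle
        · have hrev : seq1.reverse.take seq2.reverse.length ≠ seq2.reverse := by
            intro heq
            apply h
            have : (seq1.drop (seq1.length - seq2.length)).reverse
                = seq1.reverse.take (seq1.length - (seq1.length - seq2.length)) :=
              List.reverse_drop ..
            have h2 : (seq1.drop (seq1.length - seq2.length)).reverse = seq2.reverse := by
              rw [this]
              have : seq1.length - (seq1.length - seq2.length) = seq2.length := by omega
              rw [this]
              simpa using heq
            have := congrArg List.reverse h2
            simpa using this
          obtain ⟨k, hk, hne⟩ := exists_mismatch (by simp; omega) hrev
          exact Or.inr ⟨k, by omega, hk, hne⟩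
  rw [hbeg, hend]
  simp only [bLargest_prefix, bLargest_suffix]
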